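-- pv_equiv track=rewrite | github.com/DragonOfTheEast/kattisProblems | geneticsearch.py | _test_string_remove_char
-- ===== SOURCE A (Python) =====
-- def _test_string(string, test_string):
--    ans = 0
--    index = 0
--    prev_ans = 0
--    while True:
--         prev_ans = string[index:].find(test_string)
--         if prev_ans == -1:
--             break
--         ans += 1
--         index += prev_ans +1
--    return ans
--
-- def _test_string_remove_char(string, test_string):
--     ans = 0
--     seen = set()
--     for index, char in enumerate(test_string):
--         temp = test_string[:index] + test_string[index+1:]
--         if temp in seen:
--             continue
--         seen.add(temp)
--         ans += _test_string(string, temp)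
--     return ans
-- ===== SOURCE B (Python) =====
-- def _test_string_remove_char(string, test_string):
--     # single pass over `string`: build the set of distinct single-char-deletion
--     # variants once, then count windows of length len(test_string)-1 that are in it
--     variants = {test_string[:i] + test_string[i + 1:] for i in range(len(test_string))}
--     if not variants:
--         return 0
--     k = len(test_string) - 1
--     return sum(1 for i in range(len(string) - k + 1) if string[i:i + k] in variants)
-- ===== Notes on version B (the rewrite author's own statement) =====
-- stated objective: alternative
-- what changed: Instead of running a repeated .find scan of `string` for each distinct deletion variant, B builds the set of distinct single-char-deletion variants once and makes one pass over `string`, counting windows of length len(test_string)-1 that belong to the set.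
-- outside the precondition, e.g. on _test_string_remove_char('ab', 'x'): A does not finish within the time limit, B returns 3
import Mathlib
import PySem

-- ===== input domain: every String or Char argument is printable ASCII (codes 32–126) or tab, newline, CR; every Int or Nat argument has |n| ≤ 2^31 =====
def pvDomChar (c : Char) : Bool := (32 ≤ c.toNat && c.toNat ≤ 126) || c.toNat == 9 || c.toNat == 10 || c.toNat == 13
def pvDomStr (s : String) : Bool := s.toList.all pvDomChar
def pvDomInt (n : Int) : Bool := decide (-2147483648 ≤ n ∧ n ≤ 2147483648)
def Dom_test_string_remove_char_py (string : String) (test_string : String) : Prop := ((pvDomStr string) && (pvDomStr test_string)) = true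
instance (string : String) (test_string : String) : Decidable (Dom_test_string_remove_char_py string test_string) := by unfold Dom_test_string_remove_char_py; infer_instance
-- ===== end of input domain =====

-- B replaces A's per-variant repeated-.find scans of `string` by a single pass over
-- `string` that tests each window against the set of distinct deletion variants.

-- ===== PORT A =====
-- the `while True` loop of the helper `_test_string`; fuel bounds the iteration
-- count (the index grows by at least 1 per round, so `s.length + 1` fuel is enough
-- whenever the pattern is nonempty; Pre_ excludes the diverging empty-pattern case)
def pvFindLoop (s t : List Char) : Nat → Int → Int → Int
  | 0, ans, _ => ans
  | fuel + 1, ans, index =>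
    let prev := PySem.Chars.find (PySem.Chars.slice s (some index) none) t
    if prev = -1 then ans
    else pvFindLoop s t fuel (ans + 1) (index + prev + 1)

def test_string_remove_char_py (string : String) (test_string : String) : Int :=
  let s := string.toList
  let t := test_string.toList
  ((PySem.List.enumerate t).foldl
    (fun (st : Int × PySem.Set (List Char)) p =>
      let temp := PySem.Chars.slice t none (some p.1) ++ PySem.Chars.slice t (some (p.1 + 1)) none
      if PySem.Set.contains st.2 temp then st
      else (st.1 + pvFindLoop s temp (s.length + 1) 0 0, PySem.Set.add st.2 temp))
    (0, PySem.Set.empty)).1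

-- ===== PORT B =====
def test_string_remove_char_py_alt (string : String) (test_string : String) : Int :=
  let s := string.toList
  let t := test_string.toList
  let variants : PySem.Set (List Char) :=
    PySem.Set.ofList ((PySem.List.pyRange 0 (t.length : Int)).map
      (fun i => PySem.Chars.slice t none (some i) ++ PySem.Chars.slice t (some (i + 1)) none))
  if variants.isEmpty then 0
  else
    let k : Int := (t.length : Int) - 1
    ((PySem.List.pyRange 0 ((s.length : Int) - k + 1)).map
      (fun i => if PySem.Set.contains variants (PySem.Chars.slice s (some i) (some (i + k))) then (1 : Int) else 0)).sum

-- ===== PRECONDITION & SPEC =====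
-- Pre_ excludes test_string of length exactly 1: its only deletion variant is the
-- empty string, on which A's inner find-loop never breaks, so A diverges there.
def Pre_test_string_remove_char_py (string : String) (test_string : String) : Prop :=
  test_string.toList.length ≠ 1
instance (string : String) (test_string : String) : Decidable (Pre_test_string_remove_char_py string test_string) := by unfold Pre_test_string_remove_char_py; infer_instance

def pvWitness_test_string_remove_char_py : String × String := ("abcabca", "abc")

def Spec_test_string_remove_char_py (string : String) (test_string : String) (out : Int) : Prop := out = test_string_remove_char_py_alt string test_string
instance (string : String) (test_string : String) (out : Int) : Decidable (Spec_test_string_remove_char_py string test_string out) := by unfold Spec_test_string_remove_char_py; infer_instance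

-- ===== CLAIM (what is proved, stated in full; the proofs are below) =====
def Claim_equal_test_string_remove_char_py : Prop := ∀ (string : String) (test_string : String), Dom_test_string_remove_char_py string test_string → Pre_test_string_remove_char_py string test_string → Spec_test_string_remove_char_py string test_string (test_string_remove_char_py string test_string)

-- ===== LEMMAS AND PROOFS =====

-- the deletion variant of t at position i, and the overlapping occurrence count of v in s
def pvDel (t : List Char) (i : Nat) : List Char := t.take i ++ t.drop (i + 1)
def pvOcc (s v : List Char) : Nat := (List.range (s.length + 1)).countP (fun i => v.isPrefixOf (s.drop i))

theorem pv_prefix_drop_infix {t u : List Char} {j : Nat} (h : t <+: u.drop j) : t <:+: u := by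
  obtain ⟨r, hr⟩ := h
  exact ⟨u.take j, r, by rw [List.append_assoc, hr, List.take_append_drop]⟩

theorem pvFindLoop_eq (s t : List Char) (ht : t ≠ []) :
    ∀ (fuel idx : Nat) (ans : Int), s.length + 1 ≤ fuel + idx →
      pvFindLoop s t fuel ans (idx : Int)
        = ans + ((List.range' idx (s.length + 1 - idx)).countP (fun i => t.isPrefixOf (s.drop i)) : Nat) := by
  intro fuel
  induction fuel with
  | zero =>
    intro idx ans h
    have : s.length + 1 - idx = 0 := by omega
    simp [pvFindLoop, this]
  | succ fuel ih =>
    intro idx ans h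
    rw [pvFindLoop]
    simp only [PySem.Chars.slice_eq_listSlice, PySem.List.slice_from_natCast]
    by_cases hinf : t <:+: s.drop idx
    · -- find succeeds
      have hnn : 0 ≤ PySem.Chars.find (s.drop idx) t := (PySem.Chars.find_nonneg_iff _ _).2 hinf
      have hne : ¬ PySem.Chars.find (s.drop idx) t = -1 := by omega
      rw [if_neg hne]
      obtain ⟨hpre, hmin⟩ := PySem.Chars.find_spec (s := s.drop idx) (sub := t) hnn
      set p := PySem.Chars.find (s.drop idx) t with hp
      set q := p.toNat with hq
      have hqp : (q : Int) = p := Int.toNat_of_nonneg hnn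
      -- bound: idx + q + t.length ≤ s.length
      have hlen : t.length ≤ (List.drop q (List.drop idx s)).length := hpre.length_le
      have htpos : 0 < t.length := List.length_pos_iff.mpr ht
      have hbound : idx + q + 1 ≤ s.length := by
        simp only [List.length_drop] at hlen; omega
      have harg : (idx : Int) + p + 1 = ((idx + q + 1 : Nat) : Int) := by push_cast [← hqp]; ring
      rw [harg, ih (idx + q + 1) (ans + 1) (by omega)]
      -- split the count
      have hsplit : List.range' idx (s.length + 1 - idx)
          = List.range' idx q ++ [idx + q] ++ List.range' (idx + q + 1) (s.length + 1 - (idx + q + 1)) := by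
        have h1 : List.range' idx q ++ [idx + q] = List.range' idx (q + 1) := by
          rw [List.range'_concat]; norm_num
        have h2 : s.length + 1 - idx = (q + 1) + (s.length + 1 - (idx + q + 1)) := by omega
        rw [h2, ← List.range'_append, ← h1]
        norm_num [Nat.add_assoc]
      rw [hsplit]
      simp only [List.countP_append]
      have hc1 : (List.range' idx q).countP (fun i => t.isPrefixOf (s.drop i)) = 0 := by
        rw [List.countP_eq_zero]
        intro a ha
        rw [List.mem_range'] at ha
        obtain ⟨i, hi, rfl⟩ := ha
        have := hmin i hi
        simp only [List.drop_drop] at this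
        simpa [Nat.add_comm idx i] using this
      have hc2 : ([idx + q].countP (fun i => t.isPrefixOf (s.drop i))) = 1 := by
        have : t.isPrefixOf (s.drop (idx + q)) = true := by
          rw [List.isPrefixOf_iff_prefix]
          simpa [List.drop_drop, Nat.add_comm q idx] using hpre
        simp [this]
      rw [hc1, hc2]
      push_cast
      ring
    · -- find fails
      have : PySem.Chars.find (s.drop idx) t = -1 := (PySem.Chars.find_eq_neg_one_iff _ _).2 hinf
      rw [if_pos this]
      have hc : (List.range' idx (s.length + 1 - idx)).countP (fun i => t.isPrefixOf (s.drop i)) = 0 := by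
        rw [List.countP_eq_zero]
        intro a ha
        rw [List.mem_range'] at ha
        obtain ⟨i, hi, rfl⟩ := ha
        intro hpre
        rw [List.isPrefixOf_iff_prefix] at hpre
        exact hinf (pv_prefix_drop_infix (j := i) (by simpa [List.drop_drop, Nat.add_comm i idx] using hpre))
      simp [hc]

theorem pv_prefix_update (seen : PySem.Set (List Char)) (vs : List (List Char)) :
    seen <+: PySem.Set.update seen vs := by
  induction vs generalizing seen with
  | nil => simp [PySem.Set.update]
  | cons v vs ih =>
    have h1 : seen <+: PySem.Set.add seen v := by
      unfold PySem.Set.add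
      split_ifs with h
      · exact List.prefix_refl _
      · exact ⟨[v], rfl⟩
    have h2 : PySem.Set.update seen (v :: vs) = PySem.Set.update (PySem.Set.add seen v) vs := by
      simp [PySem.Set.update]
    rw [h2]
    exact h1.trans (ih _)

theorem pv_dedup_fold (g : List Char → Int) :
    ∀ (vs : List (List Char)) (ans : Int) (seen : PySem.Set (List Char)),
      (vs.foldl (fun (st : Int × PySem.Set (List Char)) v =>
          if PySem.Set.contains st.2 v then st
          else (st.1 + g v, PySem.Set.add st.2 v)) (ans, seen)).1
        = ans + (((PySem.Set.update seen vs).drop seen.length).map g).sum := by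
  intro vs
  induction vs with
  | nil => intro ans seen; simp [PySem.Set.update]
  | cons v vs ih =>
    intro ans seen
    rw [List.foldl_cons]
    have hupd : PySem.Set.update seen (v :: vs) = PySem.Set.update (PySem.Set.add seen v) vs := by
      simp [PySem.Set.update]
    by_cases h : PySem.Set.contains seen v
    · have hadd : PySem.Set.add seen v = seen := by unfold PySem.Set.add; rw [if_pos h]
      simp only [h, if_pos]
      rw [ih ans seen, hupd, hadd]
    · have hadd : PySem.Set.add seen v = seen ++ [v] := by unfold PySem.Set.add; rw [if_neg h]
      simp only [h, if_neg, Bool.false_eq_true, not_false_iff]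
      rw [ih (ans + g v) (PySem.Set.add seen v), hupd, hadd]
      obtain ⟨r, hr⟩ := pv_prefix_update (seen ++ [v]) vs
      rw [← hr]
      have e1 : List.drop seen.length (seen ++ [v] ++ r) = v :: r := by
        rw [List.append_assoc]; simp
      have e2 : List.drop (seen ++ [v]).length (seen ++ [v] ++ r) = r := List.drop_left
      rw [e1, e2, List.map_cons, List.sum_cons]
      ring

theorem pv_exchange (V : List (List Char)) (hnd : V.Nodup) (I : List Nat) (w : Nat → List Char) :
    (I.map (fun j => if w j ∈ V then (1 : Int) else 0)).sum
      = (V.map (fun v => ((I.countP (fun j => w j == v) : Nat) : Int))).sum := by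
  induction V with
  | nil => simp
  | cons v V ih =>
    rw [List.nodup_cons] at hnd
    obtain ⟨hv, hnd⟩ := hnd
    have hsplit : ∀ j, (if w j ∈ v :: V then (1 : Int) else 0)
        = (if w j == v then (1 : Int) else 0) + (if w j ∈ V then (1 : Int) else 0) := by
      intro j
      by_cases h1 : w j = v
      · simp [h1, hv]
      · by_cases h2 : w j ∈ V <;> simp [h1, h2]
    calc (I.map (fun j => if w j ∈ v :: V then (1 : Int) else 0)).sum
        = (I.map (fun j => (if w j == v then (1 : Int) else 0) + (if w j ∈ V then (1 : Int) else 0))).sum := by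
          congr 1; exact List.map_congr_left (fun j _ => hsplit j)
      _ = (I.map (fun j => if w j == v then (1 : Int) else 0)).sum + (I.map (fun j => if w j ∈ V then (1 : Int) else 0)).sum := by
          rw [PySem.List.sum_map_add_int]
      _ = ((I.countP (fun j => w j == v) : Nat) : Int) + (V.map (fun v => ((I.countP (fun j => w j == v) : Nat) : Int))).sum := by
          rw [PySem.List.sum_map_ite_one_zero, ih hnd]
      _ = ((v :: V).map (fun v => ((I.countP (fun j => w j == v) : Nat) : Int))).sum := by
          rw [List.map_cons, List.sum_cons]

theorem pv_window_count (s v : List Char) (k : Nat) (hk : 1 ≤ k) (hv : v.length = k) :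
    (List.range (s.length + 1 - k)).countP (fun j => (s.drop j).take k == v)
      = (List.range (s.length + 1)).countP (fun i => v.isPrefixOf (s.drop i)) := by
  have hm : List.range (s.length + 1)
      = List.range (s.length + 1 - k) ++ List.range' (s.length + 1 - k) (s.length + 1 - (s.length + 1 - k)) := by
    have h2 : s.length + 1 = (s.length + 1 - k) + (s.length + 1 - (s.length + 1 - k)) := by omega
    calc List.range (s.length + 1) = List.range' 0 (s.length + 1) := List.range_eq_range'
      _ = List.range' 0 ((s.length + 1 - k) + (s.length + 1 - (s.length + 1 - k))) := by rw [← h2]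
      _ = List.range' 0 (s.length + 1 - k) ++ List.range' (0 + 1 * (s.length + 1 - k)) (s.length + 1 - (s.length + 1 - k)) := List.range'_append.symm
      _ = List.range (s.length + 1 - k) ++ List.range' (s.length + 1 - k) (s.length + 1 - (s.length + 1 - k)) := by norm_num [List.range_eq_range']
  rw [hm, List.countP_append]
  have hzero : (List.range' (s.length + 1 - k) (s.length + 1 - (s.length + 1 - k))).countP
      (fun i => v.isPrefixOf (s.drop i)) = 0 := by
    rw [List.countP_eq_zero]
    intro a ha
    rw [List.mem_range'] at ha
    obtain ⟨i, _, rfl⟩ := ha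
    intro hpre
    rw [List.isPrefixOf_iff_prefix] at hpre
    have := hpre.length_le
    rw [List.length_drop] at this
    omega
  rw [hzero, Nat.add_zero]
  apply List.countP_congr
  intro j hj
  rw [List.mem_range] at hj
  have hlen : k ≤ (s.drop j).length := by rw [List.length_drop]; omega
  rw [Bool.eq_iff_iff]
  simp only [beq_iff_eq, List.isPrefixOf_iff_prefix, List.prefix_iff_eq_take, hv]
  exact ⟨fun h => (h.mpr trivial).symm, fun h => iff_of_true h.symm trivial⟩

theorem pv_temp_eq (t : List Char) (i : Nat) :
    PySem.Chars.slice t none (some (i : Int)) ++ PySem.Chars.slice t (some ((i : Int) + 1)) none = pvDel t i := by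
  have h1 : ((i : Int) + 1) = ((i + 1 : Nat) : Int) := by push_cast; ring
  rw [PySem.Chars.slice_eq_listSlice, PySem.Chars.slice_eq_listSlice, PySem.List.slice_to_natCast, h1,
    PySem.List.slice_from_natCast, pvDel]

theorem pvDel_length {t : List Char} {i : Nat} (h : i < t.length) : (pvDel t i).length = t.length - 1 := by
  rw [pvDel, List.length_append, List.length_take, List.length_drop]; omega

theorem pv_pyRange_nonpos {M : Int} (h : M ≤ 0) : PySem.List.pyRange 0 M = [] := by
  simp [PySem.List.pyRange]; omega

-- A as a sum over the distinct variants

theorem pvA_eq (string test_string : String) :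
    test_string_remove_char_py string test_string
      = ((PySem.Set.ofList ((List.range test_string.toList.length).map (pvDel test_string.toList))).map
          (fun v => pvFindLoop string.toList v (string.toList.length + 1) 0 0)).sum := by
  unfold test_string_remove_char_py
  dsimp only
  rw [PySem.List.enumerate_eq_map_pyRange test_string.toList ' ', List.foldl_map]
  have hlen : PySem.List.len test_string.toList = (test_string.toList.length : Int) := rfl
  rw [hlen, PySem.List.pyRange_zero_natCast, List.foldl_map]
  simp only [pv_temp_eq]
  rw [← List.foldl_map (f := pvDel test_string.toList)
    (g := fun (st : Int × PySem.Set (List Char)) v =>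
      if PySem.Set.contains st.2 v then st
      else (st.1 + pvFindLoop string.toList v (string.toList.length + 1) 0 0, PySem.Set.add st.2 v))]
  rw [pv_dedup_fold]
  simp [PySem.Set.ofList_eq_foldl, PySem.Set.update, PySem.Set.empty]

theorem pvB_eq (string test_string : String) (h2 : 2 ≤ test_string.toList.length) :
    test_string_remove_char_py_alt string test_string
      = ((PySem.Set.ofList ((List.range test_string.toList.length).map (pvDel test_string.toList))).map
          (fun v => (((List.range (string.toList.length + 1 - (test_string.toList.length - 1))).countP
              (fun j => (string.toList.drop j).take (test_string.toList.length - 1) == v) : Nat) : Int))).sum := by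
  set s := string.toList with hs
  set t := test_string.toList with ht
  set n := t.length with hn
  set L := s.length with hL
  set vs := (List.range n).map (pvDel t) with hvs
  unfold test_string_remove_char_py_alt
  dsimp only
  rw [← hs, ← ht, ← hn, ← hL]
  have hvseq : (PySem.List.pyRange 0 (n : Int)).map
      (fun i => PySem.Chars.slice t none (some i) ++ PySem.Chars.slice t (some (i + 1)) none) = vs := by
    rw [PySem.List.pyRange_zero_natCast, List.map_map, hvs]
    exact List.map_congr_left (fun i _ => pv_temp_eq t i)
  rw [hvseq]
  have hmem : pvDel t 0 ∈ PySem.Set.ofList vs := by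
    rw [PySem.Set.mem_ofList, hvs]
    exact List.mem_map_of_mem (by rw [List.mem_range]; omega)
  have hne : PySem.Set.ofList vs ≠ [] := List.ne_nil_of_mem hmem
  rw [if_neg (by simpa [List.isEmpty_iff] using hne)]
  by_cases hle : n - 1 ≤ L + 1
  · have hM : (L : Int) - ((n : Int) - 1) + 1 = ((L + 1 - (n - 1) : Nat) : Int) := by
      push_cast [Nat.cast_sub (by omega : 1 ≤ n), Nat.cast_sub hle]
      ring
    rw [hM, PySem.List.pyRange_zero_natCast, List.map_map]
    have hwin : ∀ j : Nat, PySem.Chars.slice s (some (j : Int)) (some ((j : Int) + ((n : Int) - 1)))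
        = (s.drop j).take (n - 1) := by
      intro j
      have : (j : Int) + ((n : Int) - 1) = (j : Int) + ((n - 1 : Nat) : Int) := by
        push_cast [Nat.cast_sub (by omega : 1 ≤ n)]; ring
      rw [PySem.Chars.slice_eq_listSlice, this, PySem.List.slice_natCast_add]
    have hbody : ((fun i => if PySem.Set.contains (PySem.Set.ofList vs)
          (PySem.Chars.slice s (some i) (some (i + ((n : Int) - 1)))) then (1 : Int) else 0) ∘ (fun k : Nat => (k : Int)))
        = fun j : Nat => if (s.drop j).take (n - 1) ∈ PySem.Set.ofList vs then (1 : Int) else 0 := by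
      funext j
      simp only [Function.comp_apply, hwin j, PySem.Set.contains, List.contains_iff_mem]
    rw [hbody, pv_exchange _ (PySem.Set.nodup_ofList vs) (List.range (L + 1 - (n - 1)))]
  · have hM : (L : Int) - ((n : Int) - 1) + 1 ≤ 0 := by omega
    rw [pv_pyRange_nonpos hM]
    have hm0 : L + 1 - (n - 1) = 0 := by omega
    rw [hm0]
    simp

theorem main_eq (string test_string : String) (hpre : test_string.toList.length ≠ 1) :
    test_string_remove_char_py string test_string = test_string_remove_char_py_alt string test_string := by
  by_cases h0 : test_string.toList.length = 0
  · rw [pvA_eq]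
    unfold test_string_remove_char_py_alt
    dsimp only
    rw [h0]
    simp [PySem.Set.ofList, PySem.Set.empty]
  · have h2 : 2 ≤ test_string.toList.length := by omega
    rw [pvA_eq, pvB_eq string test_string h2]
    apply congrArg
    apply List.map_congr_left
    intro v hv
    have hvlen : v.length = test_string.toList.length - 1 := by
      rw [PySem.Set.mem_ofList] at hv
      obtain ⟨i, hi, rfl⟩ := List.mem_map.1 hv
      rw [List.mem_range] at hi
      exact pvDel_length hi
    have hvne : v ≠ [] := by
      intro hnil
      rw [hnil] at hvlen
      simp only [List.length_nil] at hvlen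
      omega
    have := pvFindLoop_eq string.toList v hvne (string.toList.length + 1) 0 0 (by omega)
    rw [Nat.cast_zero] at this
    rw [this]
    rw [pv_window_count string.toList v (test_string.toList.length - 1) (by omega) hvlen]
    rw [← List.range_eq_range']
    simp

-- ===== VERDICT (by name: the statement is the Claim_ definition above) =====
theorem test_string_remove_char_py_spec : Claim_equal_test_string_remove_char_py := by
  intro string test_string _ hpre
  unfold Spec_test_string_remove_char_py
  exact main_eq string test_string hpre
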